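-- pv_equiv track=rewrite | github.com/Ujimatsu-Chiya/SM2-SM3-SM4-encryption-system-implementation | SM2/Math.py | gen_lucas
-- ===== SOURCE A (Python) =====
-- def gen_lucas(p, X, Y, k):
--     inv2 = (p + 1) >> 1
--     d = (X * X - Y * 4) % p
--     U, V = 1, X
--     for i in range(k.bit_length() - 2, -1, -1):
--         U, V = U * V % p, (V * V + d * U * U) * inv2 % p
--         if k >> i & 1:
--             U, V = (X * U + V) * inv2 % p, (X * V + d * U) * inv2 % p
--     return U, V
-- ===== SOURCE B (Python) =====
-- def gen_lucas(p, X, Y, k):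
--     inv2 = (p + 1) >> 1
--     d = (X * X - Y * 4) % p
--
--     def f(k):
--         if k <= 1:
--             return 1, X
--         u, v = f(k >> 1)
--         u, v = u * v % p, (v * v + d * u * u) * inv2 % p
--         if k & 1:
--             u, v = (X * u + v) * inv2 % p, (X * v + d * u) * inv2 % p
--         return u, v
--
--     return f(k)
-- ===== Notes on version B (the rewrite author's own statement) =====
-- stated objective: alternative
-- what changed: Replaces A's iterative MSB-first loop over explicit bit positions (bit_length, range, shifts by i) with a divide-and-conquer recursion on k that halves k, applies the doubling step, and conditionally the add-one step.
-- outside the precondition, e.g. on gen_lucas(7, 3, 1, -5): A returns (6, 3), B returns (1, 3); on gen_lucas(0, 1, 1, 2): A raises ZeroDivisionError, B raises ZeroDivisionError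
import Mathlib
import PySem

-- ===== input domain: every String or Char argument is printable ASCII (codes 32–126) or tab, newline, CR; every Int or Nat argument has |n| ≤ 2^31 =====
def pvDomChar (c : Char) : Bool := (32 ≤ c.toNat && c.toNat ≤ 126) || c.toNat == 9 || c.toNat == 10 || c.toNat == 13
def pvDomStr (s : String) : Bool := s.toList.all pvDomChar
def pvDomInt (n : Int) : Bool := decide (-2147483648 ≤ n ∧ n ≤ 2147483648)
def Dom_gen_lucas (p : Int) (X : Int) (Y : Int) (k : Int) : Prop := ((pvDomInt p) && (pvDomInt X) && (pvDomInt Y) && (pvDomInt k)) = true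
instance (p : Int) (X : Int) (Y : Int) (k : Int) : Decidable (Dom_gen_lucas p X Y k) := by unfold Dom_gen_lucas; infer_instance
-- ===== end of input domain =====

-- B recomputes A's iterative MSB-first double-and-add as a divide-and-conquer recursion on k
-- (objective: alternative decomposition, same cost); equivalence is about the return value only.

-- ===== PORT A =====
-- literal transliteration of A: loop over i in range(k.bit_length()-2, -1, -1)
def gen_lucas (p : Int) (X : Int) (Y : Int) (k : Int) : Int × Int :=
  let inv2 := (p + 1) >>> (1 : Nat)
  let d := PySem.Int.mod (X * X - Y * 4) p
  List.foldl
    (fun (UV : Int × Int) (i : Int) =>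
      let U := PySem.Int.mod (UV.1 * UV.2) p
      let V := PySem.Int.mod ((UV.2 * UV.2 + d * UV.1 * UV.1) * inv2) p
      if PySem.Int.band (k >>> i.toNat) 1 ≠ 0 then
        (PySem.Int.mod ((X * U + V) * inv2) p, PySem.Int.mod ((X * V + d * U) * inv2) p)
      else (U, V))
    (1, X)
    (PySem.List.pyRange ((PySem.Int.bitLength k : Int) - 2) (-1) (-1))

-- ===== PORT B =====
-- Source B's inner recursive helper f (p, X, d, inv2 are the captured variables)
def lucasF (p : Int) (X : Int) (d : Int) (inv2 : Int) (k : Int) : Int × Int :=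
  if k ≤ 1 then (1, X)
  else
    let uv := lucasF p X d inv2 (k >>> (1 : Nat))
    let u := PySem.Int.mod (uv.1 * uv.2) p
    let v := PySem.Int.mod ((uv.2 * uv.2 + d * uv.1 * uv.1) * inv2) p
    if PySem.Int.band k 1 ≠ 0 then
      (PySem.Int.mod ((X * u + v) * inv2) p, PySem.Int.mod ((X * v + d * u) * inv2) p)
    else (u, v)
termination_by k.toNat
decreasing_by simp only [Int.shiftRight_eq_div_pow, pow_one]; omega

def gen_lucas_alt (p : Int) (X : Int) (Y : Int) (k : Int) : Int × Int :=
  let inv2 := (p + 1) >>> (1 : Nat)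
  let d := PySem.Int.mod (X * X - Y * 4) p
  lucasF p X d inv2 k

-- ===== PRECONDITION & SPEC =====
-- Pre_ excludes p = 0, on which A raises ZeroDivisionError, and negative k —
-- a negative Lucas-sequence index is outside the function's natural domain, and A's value
-- there (mixing the bit length of |k| with two's-complement bits of k) is accidental.
def Pre_gen_lucas (p : Int) (X : Int) (Y : Int) (k : Int) : Prop := p ≠ 0 ∧ 0 ≤ k
instance (p : Int) (X : Int) (Y : Int) (k : Int) : Decidable (Pre_gen_lucas p X Y k) := by unfold Pre_gen_lucas; infer_instance
def pvWitness_gen_lucas : Int × Int × Int × Int := (7, 3, 1, 10)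
def Spec_gen_lucas (p : Int) (X : Int) (Y : Int) (k : Int) (out : Int × Int) : Prop := out = gen_lucas_alt p X Y k
instance (p : Int) (X : Int) (Y : Int) (k : Int) (out : Int × Int) : Decidable (Spec_gen_lucas p X Y k out) := by unfold Spec_gen_lucas; infer_instance

-- ===== CLAIM (what is proved, stated in full; the proofs are below) =====
def Claim_equal_gen_lucas : Prop := ∀ (p : Int) (X : Int) (Y : Int) (k : Int), Dom_gen_lucas p X Y k → Pre_gen_lucas p X Y k → Spec_gen_lucas p X Y k (gen_lucas p X Y k)

-- ===== LEMMAS AND PROOFS =====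

-- named forms of the two-step bodies shared by both programs
def pvDbl (p d inv2 : Int) (uv : Int × Int) : Int × Int :=
  (PySem.Int.mod (uv.1 * uv.2) p, PySem.Int.mod ((uv.2 * uv.2 + d * uv.1 * uv.1) * inv2) p)

def pvAdd (p X d inv2 : Int) (uv : Int × Int) : Int × Int :=
  (PySem.Int.mod ((X * uv.1 + uv.2) * inv2) p, PySem.Int.mod ((X * uv.2 + d * uv.1) * inv2) p)

def pvStep (p X d inv2 k : Int) (uv : Int × Int) (i : Int) : Int × Int :=
  let w := pvDbl p d inv2 uv
  if PySem.Int.band (k >>> i.toNat) 1 ≠ 0 then pvAdd p X d inv2 w else w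

theorem pv_shift_one (k : Int) : k >>> (1 : Nat) = PySem.Int.floordiv k 2 := by
  rw [Int.shiftRight_eq_div_pow, PySem.Int.floordiv_eq_ediv_of_pos (by norm_num)]
  norm_num

theorem pv_shift_succ (k : Int) (n : Nat) : k >>> (n + 1) = (k >>> (1 : Nat)) >>> n := by
  simp [Int.shiftRight_eq_div_pow, pow_succ, Int.ediv_ediv_of_nonneg, mul_comm]

theorem pv_gen_lucas_eq (p X Y k : Int) :
    gen_lucas p X Y k =
      List.foldl (pvStep p X (PySem.Int.mod (X * X - Y * 4) p) ((p + 1) >>> (1 : Nat)) k) (1, X)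
        (PySem.List.pyRange ((PySem.Int.bitLength k : Int) - 2) (-1) (-1)) := rfl

theorem pv_bitLength_pos {k : Int} (h : k ≠ 0) : 1 ≤ PySem.Int.bitLength k := by
  rcases Nat.eq_zero_or_pos (PySem.Int.bitLength k) with h0 | h1
  · have h2 := PySem.Int.lt_two_pow_bitLength k
    rw [h0] at h2
    simp at h2
    omega
  · exact h1

theorem pv_loop_eq_rec (p X d inv2 : Int) :
    ∀ (n : Nat) (k : Int), 0 ≤ k → k.toNat = n →
      List.foldl (pvStep p X d inv2 k) (1, X)
          (PySem.List.pyRange ((PySem.Int.bitLength k : Int) - 2) (-1) (-1))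
        = lucasF p X d inv2 k := by
  intro n
  induction n using Nat.strong_induction_on with
  | _ n ih =>
    intro k hk hkn
    by_cases hk1 : k ≤ 1
    · -- k = 0 or k = 1 : empty range, base case
      have hbl : PySem.Int.bitLength k ≤ 1 := by
        interval_cases k <;> decide
      rw [PySem.List.pyRange_neg_one_eq_nil (by push_cast; omega)]
      rw [lucasF, if_pos hk1]
      rfl
    · -- k ≥ 2 : peel bit 0, shift the rest
      have hk2 : 2 ≤ k := by omega
      set kh := PySem.Int.floordiv k 2 with hkh
      have hshift : k >>> (1 : Nat) = kh := pv_shift_one k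
      have hkhval : kh = k / 2 := by
        rw [hkh, PySem.Int.floordiv_eq_ediv_of_pos (by norm_num)]
      have hkhb : 1 ≤ kh ∧ kh < k := by rw [hkhval]; omega
      have hbl : PySem.Int.bitLength k = PySem.Int.bitLength kh + 1 :=
        PySem.Int.bitLength_of_pos (by omega)
      have hblkh : 1 ≤ PySem.Int.bitLength kh := pv_bitLength_pos (by omega)
      set m : Nat := PySem.Int.bitLength kh - 1 with hm
      have hblm : PySem.Int.bitLength kh = m + 1 := by omega
      have hcast : (PySem.Int.bitLength k : Int) - 2 = (m : Int) := by
        rw [hbl, hblm]; push_cast; ring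
      have hcast2 : (PySem.Int.bitLength kh : Int) - 2 = (m : Int) - 1 := by
        rw [hblm]; push_cast; ring
      -- outer range = shifted inner range ++ [0]
      rw [hcast, PySem.List.pyRange_neg_one]
      have hlen : ((m : Int) - -1).toNat = m + 1 := by omega
      rw [hlen, List.range_succ, List.map_append, List.foldl_append]
      -- the prefix equals the loop for kh
      have hpre :
          List.foldl (pvStep p X d inv2 k) (1, X)
              (List.map (fun j : Nat => (m : Int) - (j : Int)) (List.range m))
            = lucasF p X d inv2 kh := by
        rw [← ih kh.toNat (by omega) kh (by omega) rfl, hcast2, PySem.List.pyRange_neg_one]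
        have hlen2 : ((m : Int) - 1 - -1).toNat = m := by omega
        rw [hlen2]
        simp only [List.foldl_map]
        apply PySem.List.foldl_congr_mem
        intro acc j hj
        have hjm : j < m := List.mem_range.mp hj
        have e1 : ((m : Int) - (j : Int)).toNat = (m - 1 - j) + 1 := by omega
        have e2 : ((m : Int) - 1 - (j : Int)).toNat = m - 1 - j := by omega
        simp only [pvStep, e1, e2, pv_shift_succ, hshift]
      rw [hpre]
      -- the final element is bit 0 of k
      conv_rhs => rw [lucasF]
      rw [if_neg hk1, hshift]
      simp only [List.map_cons, List.map_nil, List.foldl_cons, List.foldl_nil, pvStep, pvDbl,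
        pvAdd]
      have e0 : ((m : Int) - (m : Int)).toNat = 0 := by omega
      rw [e0]
      simp only [Int.shiftRight_eq_div_pow, pow_zero]
      norm_num

-- ===== VERDICT (by name: the statement is the Claim_ definition above) =====
theorem gen_lucas_spec : Claim_equal_gen_lucas := by
  intro p X Y k _ hpre
  unfold Spec_gen_lucas gen_lucas_alt
  rw [pv_gen_lucas_eq]
  exact pv_loop_eq_rec p X _ _ k.toNat k hpre.2 rfl
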